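-- pv_equiv track=rewrite | github.com/Szymon-Budziak/Algorithms_and_Data_Structures_course_AGH | Greedy algorithms/15_suit_and_tie.py | suit_and_tie
-- ===== SOURCE A (Python) =====
-- def suit_and_tie(n, T):
--     swaps = 0
--     for i in range(0, len(T), 2):
--         for j in range(i + 1, len(T)):
--             if T[i] == T[j]:
--                 index = j
--                 while T[i] != T[i + 1]:
--                     T[index], T[index - 1] = T[index - 1], T[index]
--                     index -= 1
--                     swaps += 1
--     return swaps
-- ===== SOURCE B (Python) =====
-- def suit_and_tie(n, T):
--     # Consume the list pair by pair: pop the front, jump its first partner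
--     # directly to it and add the distance, instead of bubbling one swap at a time.
--     L = list(T)
--     swaps = 0
--     while len(L) >= 2:
--         x = L.pop(0)
--         try:
--             j = L.index(x)
--             swaps += j
--             del L[j]
--         except ValueError:
--             del L[0]
--     return swaps
-- ===== Notes on version B (the rewrite author's own statement) =====
-- stated objective: faster
-- what changed: B replaces A's triple-nested scan-and-bubble (one counted adjacent swap at a time) by a single consuming pass: pop the front element, locate its first partner, add its distance in one step and delete it, so the per-pair cost drops from O(distance) writes plus a full rescan to one index lookup and one deletion.
import Mathlib
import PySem

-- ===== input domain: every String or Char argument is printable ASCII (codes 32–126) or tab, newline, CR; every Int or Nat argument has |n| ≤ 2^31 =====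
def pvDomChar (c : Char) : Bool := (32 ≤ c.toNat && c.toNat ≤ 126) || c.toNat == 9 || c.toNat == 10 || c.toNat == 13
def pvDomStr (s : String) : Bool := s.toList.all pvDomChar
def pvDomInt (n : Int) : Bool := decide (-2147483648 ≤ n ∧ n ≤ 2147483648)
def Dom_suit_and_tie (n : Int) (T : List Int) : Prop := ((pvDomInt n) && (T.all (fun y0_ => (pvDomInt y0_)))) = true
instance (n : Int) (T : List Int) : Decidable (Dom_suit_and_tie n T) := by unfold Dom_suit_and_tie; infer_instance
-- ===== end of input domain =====

-- B replaces A's scan-and-bubble (one adjacent swap at a time) by one consuming pass that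
-- jumps each partner next to its mate directly, adding the whole distance at once (faster by
-- a constant factor). A mutates its list argument T in place; B does not — the equivalence
-- proved here is about the return value only.

-- ===== PORT A =====
-- the 'while T[i] != T[i+1]' bubbling loop; fuel = index.natAbs bounds its iterations
-- (the loop stops no later than index = i+1, so the fuel is never exhausted on a run
-- that Python performs; list accesses are in range in every reachable state, so the
-- pyGetD/pySetD defaults are never consulted)
def pvBubble (T : List Int) (i : Int) (index : Int) (swaps : Int) : Nat → List Int × Int
  | 0 => (T, swaps)
  | fuel+1 =>
    if PySem.List.pyGet? T i ≠ PySem.List.pyGet? T (i+1) then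
      pvBubble
        (PySem.List.pySetD (PySem.List.pySetD T index (PySem.List.pyGetD T (index-1) 0))
          (index-1) (PySem.List.pyGetD T index 0))
        i (index-1) (swaps+1) fuel
    else (T, swaps)

-- the inner 'for j in range(i+1, len(T))' loop of A
def pvInner (L : Int) (i : Int) (st : List Int × Int) : List Int × Int :=
  (PySem.List.pyRange (i+1) L 1).foldl
    (fun st2 j =>
      if PySem.List.pyGet? st2.1 i = PySem.List.pyGet? st2.1 j then
        pvBubble st2.1 i j st2.2 j.natAbs
      else st2) st

def suit_and_tie (n : Int) (T : List Int) : Int :=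
  ((PySem.List.pyRange 0 (T.length : Int) 2).foldl
    (fun st i => pvInner (T.length : Int) i st) (T, 0)).2

-- ===== PORT B =====
-- one consuming pass: pop the front, find its first partner, add the distance, delete it
def pvGo : List Int → Int → Int
  | [], swaps => swaps
  | [_], swaps => swaps
  | x :: y :: rest, swaps =>
    match PySem.List.index? (y :: rest) x with
    | some j => pvGo ((y :: rest).eraseIdx j) (swaps + j)
    | none => pvGo rest swaps
termination_by L _ => L.length
decreasing_by
  · simp [List.length_eraseIdx]; split <;> omega
  · simp

def suit_and_tie_alt (n : Int) (T : List Int) : Int := pvGo T 0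

-- ===== PRECONDITION & SPEC =====
def Spec_suit_and_tie (n : Int) (T : List Int) (out : Int) : Prop := out = suit_and_tie_alt n T
instance (n : Int) (T : List Int) (out : Int) : Decidable (Spec_suit_and_tie n T out) := by unfold Spec_suit_and_tie; infer_instance

-- ===== CLAIM (what is proved, stated in full; the proofs are below) =====
def Claim_equal_suit_and_tie : Prop := ∀ (n : Int) (T : List Int), Dom_suit_and_tie n T → Spec_suit_and_tie n T (suit_and_tie n T)

-- ===== LEMMAS AND PROOFS =====

lemma set_at {α : Type} (R : List α) (y v : α) (u : List α) : (R ++ y :: u).set R.length v = R ++ v :: u := by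
  induction R with
  | nil => rfl
  | cons a R ih => simp [List.set, ih]
lemma getD_at {α : Type} [Inhabited α] (R : List α) (y : α) (u : List α) (d : α) : (R ++ y :: u).getD R.length d = y := by
  induction R with
  | nil => rfl
  | cons a R ih => simpa using ih
lemma pyGet_at (R : List Int) (y : Int) (u : List Int) (i : Int) (hi : i = (R.length : Int)) :
    PySem.List.pyGet? (R ++ y :: u) i = some y := by
  subst hi; rw [PySem.List.pyGet?_natCast]; simp
lemma pyGetD_at (R : List Int) (y : Int) (u : List Int) (i : Int) (hi : i = (R.length : Int)) (d : Int) :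
    PySem.List.pyGetD (R ++ y :: u) i d = y := by
  subst hi; rw [PySem.List.pyGetD_natCast]; exact getD_at R y u d
lemma pySet_at (R : List Int) (y v : Int) (u : List Int) (i : Int) (hi : i = (R.length : Int)) :
    PySem.List.pySetD (R ++ y :: u) i v = R ++ v :: u := by
  subst hi; rw [PySem.List.pySetD_natCast]; exact set_at R y v u
lemma pyGet_right (R u : List Int) (k : Nat) (hk : k < u.length) :
    PySem.List.pyGet? (R ++ u) ((R.length + k : Nat) : Int) = some (u[k]) := by
  rw [PySem.List.pyGet?_natCast, List.getElem?_append_right (by omega),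
      show R.length + k - R.length = k by omega, List.getElem?_eq_getElem hk]
lemma foldl_fixed {α β : Type} (f : β → α → β) (st : β) :
    ∀ (l : List α), (∀ j ∈ l, f st j = st) → l.foldl f st = st := by
  intro l
  induction l with
  | nil => intro _; rfl
  | cons a l ih => intro h; simp only [List.foldl_cons, h a (by simp)]; exact ih (fun j hj => h j (by simp [hj]))
lemma step_fixed (a : Int) (st : List Int × Int) (j : Int) (hj : 0 < j)
    (hsame : PySem.List.pyGet? st.1 a = PySem.List.pyGet? st.1 (a+1)) :
    (if PySem.List.pyGet? st.1 a = PySem.List.pyGet? st.1 j then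
        pvBubble st.1 a j st.2 j.natAbs
      else st) = st := by
  split
  · obtain ⟨f, hf⟩ : ∃ f, j.natAbs = f + 1 := ⟨j.natAbs - 1, by omega⟩
    rw [hf, pvBubble]
    simp [hsame]
  · rfl
lemma bubble_run (t : List Int) (x : Int) (jrel : Nat) (hj : jrel < t.length)
    (hx : 0 < jrel → t.head? ≠ some x) :
    ∀ (r : Nat) (P : List Int) (s : Int) (fuel : Nat), r ≤ jrel → r < fuel →
    pvBubble (P ++ x :: (t.take r ++ x :: ((t.take jrel).drop r ++ t.drop (jrel+1))))
      ((P.length : Int)) ((P.length : Int) + 1 + r) s fuel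
    = (P ++ x :: x :: (t.take jrel ++ t.drop (jrel+1)), s + r) := by
  intro r
  induction r with
  | zero =>
    intro P s fuel _ hf
    obtain ⟨f, rfl⟩ : ∃ f, fuel = f + 1 := ⟨fuel - 1, by omega⟩
    rw [pvBubble]
    have h1 : PySem.List.pyGet? (P ++ x :: ([] ++ x :: (t.take jrel ++ t.drop (jrel+1)))) (P.length : Int) = some x :=
      pyGet_at P x _ _ rfl
    have h2 : PySem.List.pyGet? (P ++ x :: ([] ++ x :: (t.take jrel ++ t.drop (jrel+1)))) ((P.length : Int) + 1) = some x := by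
      have := pyGet_at (P ++ [x]) x (t.take jrel ++ t.drop (jrel+1)) ((P.length : Int) + 1) (by push_cast; simp)
      simpa using this
    simp only [List.take_zero, List.drop_zero, List.nil_append] at *
    simp [h1, h2]
  | succ r ih =>
    intro P s fuel hr hf
    obtain ⟨f, rfl⟩ : ∃ f, fuel = f + 1 := ⟨fuel - 1, by omega⟩
    obtain ⟨t0, t', rfl⟩ : ∃ t0 t', t = t0 :: t' := by
      cases t with
      | nil => simp at hj
      | cons a b => exact ⟨a, b, rfl⟩
    have hrlen : r < (t0 :: t').length := by omega
    set t := t0 :: t' with ht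
    have htr : t.take (r+1) = t.take r ++ [t[r]'(by omega)] := List.take_succ_eq_append_getElem (by omega)
    have hdr : (t.take jrel).drop r = t[r]'(by omega) :: (t.take jrel).drop (r+1) := by
      have hlt : r < (t.take jrel).length := by simp; omega
      rw [List.drop_eq_getElem_cons hlt, List.getElem_take]
    rw [pvBubble]
    -- the current list, in its three decompositions
    set v := t[r]'(by omega) with hv
    have hC : P ++ x :: (t.take (r+1) ++ x :: ((t.take jrel).drop (r+1) ++ t.drop (jrel+1)))
        = (P ++ x :: t.take r) ++ v :: x :: ((t.take jrel).drop (r+1) ++ t.drop (jrel+1)) := by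
      rw [htr]; simp
    have hlenR : ((P ++ x :: t.take r).length : Int) = (P.length : Int) + 1 + r := by
      simp [List.length_take]; omega
    have hY : ∀ Y : List Int, t.take r ++ v :: Y = t0 :: (t'.take r ++ Y) := by
      intro Y
      have : t.take r ++ v :: Y = t.take (r+1) ++ Y := by rw [htr]; simp
      rw [this, ht]; simp
    have ht0 : t0 ≠ x := by
      have := hx (by omega); simp [ht] at this; exact this
    set Y := (t.take jrel).drop (r+1) ++ t.drop (jrel+1) with hYdef
    set R := P ++ x :: t.take r with hR
    have e1 : PySem.List.pyGet? (R ++ v :: x :: Y) (P.length : Int) = some x := by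
      have := pyGet_at P x (t.take r ++ v :: x :: Y) (P.length : Int) rfl
      simpa [hR] using this
    have e2 : PySem.List.pyGet? (R ++ v :: x :: Y) ((P.length : Int) + 1) = some t0 := by
      have hsh : R ++ v :: x :: Y = (P ++ [x]) ++ t0 :: (t'.take r ++ x :: Y) := by
        have h1 : R ++ v :: x :: Y = P ++ x :: (t.take r ++ v :: (x :: Y)) := by rw [hR]; simp
        rw [h1, hY (x :: Y)]; simp
      rw [hsh]
      exact pyGet_at (P ++ [x]) t0 _ _ (by push_cast; simp)
    have hcond : PySem.List.pyGet? (R ++ v :: x :: Y) (P.length : Int) ≠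
        PySem.List.pyGet? (R ++ v :: x :: Y) ((P.length : Int) + 1) := by
      rw [e1, e2]; simp; exact fun h => ht0 h.symm
    rw [hC]
    simp only [if_pos hcond]
    -- evaluate the two reads and two writes of the swap
    have idx1 : (P.length : Int) + 1 + (r+1 : Nat) - 1 = (R.length : Int) := by
      rw [hlenR]; push_cast; ring
    have idx2 : (P.length : Int) + 1 + (r+1 : Nat) = ((R ++ [v]).length : Int) := by
      simp only [List.length_append, List.length_cons, List.length_singleton]
      rw [hlenR] at *; push_cast; simp [hR]; omega
    have g1 : PySem.List.pyGetD (R ++ v :: x :: Y) ((P.length : Int) + 1 + (r+1 : Nat) - 1) 0 = v :=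
      pyGetD_at R v (x :: Y) _ idx1 0
    have g2 : PySem.List.pyGetD (R ++ v :: x :: Y) ((P.length : Int) + 1 + (r+1 : Nat)) 0 = x := by
      have := pyGetD_at (R ++ [v]) x Y _ idx2 0
      simpa using this
    have w1 : PySem.List.pySetD (R ++ v :: x :: Y) ((P.length : Int) + 1 + (r+1 : Nat)) v = R ++ v :: v :: Y := by
      have := pySet_at (R ++ [v]) x v Y _ idx2
      simpa using this
    have w2 : PySem.List.pySetD (R ++ v :: v :: Y) ((P.length : Int) + 1 + (r+1 : Nat) - 1) x = R ++ x :: v :: Y :=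
      pySet_at R v x (v :: Y) _ idx1
    rw [g1, g2, w1, w2]
    have hback : R ++ x :: v :: Y = P ++ x :: (t.take r ++ x :: ((t.take jrel).drop r ++ t.drop (jrel+1))) := by
      rw [hR, hYdef, hdr]; simp
    rw [hback]
    have := ih P (s+1) f (by omega) (by omega)
    push_cast
    rw [show (P.length:Int) + 1 + ((r:Int) + 1) - 1 = (P.length:Int) + 1 + (r:Int) by ring]
    rw [this]
    congr 1; ring
lemma inner_run (P : List Int) (x : Int) (t : List Int) (s : Int) :
    pvInner ((P.length : Int) + 1 + t.length) (P.length : Int) (P ++ x :: t, s)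
    = match PySem.List.index? t x with
      | some j => (P ++ x :: x :: (t.take j ++ t.drop (j+1)), s + j)
      | none => (P ++ x :: t, s) := by
  have hgetA : ∀ u : List Int, PySem.List.pyGet? (P ++ x :: u) (P.length : Int) = some x :=
    fun u => pyGet_at P x u _ rfl
  have hgetT : ∀ (j : Int) (k : Nat) (hk : k < t.length), j = ((P.length + 1 + k : Nat) : Int) →
      PySem.List.pyGet? (P ++ x :: t) j = some (t[k]) := by
    intro j k hk hjk
    have := pyGet_right (P ++ [x]) t k hk
    rw [hjk, show P ++ x :: t = (P ++ [x]) ++ t by simp,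
        show ((P.length + 1 + k : Nat) : Int) = (((P ++ [x]).length + k : Nat) : Int) by simp]
    exact this
  cases hidx : PySem.List.index? t x with
  | none =>
    have hnot : x ∉ t := (PySem.List.index?_eq_none_iff t x).mp hidx
    unfold pvInner
    apply foldl_fixed
    intro j hjmem
    rw [PySem.List.mem_pyRange_one] at hjmem
    obtain ⟨h1, h2⟩ := hjmem
    have hk : (j - P.length - 1).toNat < t.length := by omega
    rw [hgetT j _ hk (by push_cast; omega), hgetA, if_neg]
    intro hc
    have hxm : x ∈ t := by rw [Option.some_inj.mp hc]; exact List.getElem_mem _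
    exact hnot hxm
  | some j =>
    obtain ⟨hjlen, hjx, hjfirst⟩ := PySem.List.getElem_of_index?_eq_some hidx
    have hsplit : PySem.List.pyRange ((P.length : Int) + 1) ((P.length : Int) + 1 + t.length) 1
        = PySem.List.pyRange ((P.length : Int) + 1) ((P.length : Int) + 1 + j) 1
          ++ ((P.length : Int) + 1 + j) :: PySem.List.pyRange ((P.length : Int) + 1 + j + 1) ((P.length : Int) + 1 + t.length) 1 := by
      rw [PySem.List.pyRange_one_append ((P.length : Int) + 1) ((P.length : Int) + 1 + j) _ (by omega) (by push_cast; omega)]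
      congr 1
      exact PySem.List.pyRange_one_cons (by push_cast; omega)
    unfold pvInner
    rw [hsplit, List.foldl_append]
    -- phase 1: scans before the first occurrence do nothing
    rw [foldl_fixed _ (P ++ x :: t, s) (PySem.List.pyRange ((P.length : Int) + 1) ((P.length : Int) + 1 + j) 1) (by
      intro j' hj'
      rw [PySem.List.mem_pyRange_one] at hj'
      obtain ⟨h1, h2⟩ := hj'
      have hlt : (j' - P.length - 1).toNat < j := by omega
      rw [hgetT j' ((j' - P.length - 1).toNat) (by omega) (by push_cast; omega), hgetA, if_neg]
      intro hc
      exact hjfirst _ hlt (Option.some_inj.mp hc).symm)]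
    -- phase 2: the matching j bubbles the partner home
    rw [List.foldl_cons]
    have hdecomp : P ++ x :: t = P ++ x :: (t.take j ++ x :: ((t.take j).drop j ++ t.drop (j+1))) := by
      rw [List.drop_eq_nil_of_le (by simp), List.nil_append]
      rw [← hjx, ← List.drop_eq_getElem_cons hjlen, List.take_append_drop]
    have hmatch : PySem.List.pyGet? (P ++ x :: t) ((P.length : Int) + 1 + j) = some x := by
      rw [hgetT _ j hjlen (by push_cast; omega)]
      rw [hjx]
    rw [hgetA, hmatch, if_pos rfl]
    have hfuel : j < ((P.length : Int) + 1 + j).natAbs := by omega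
    have hx0 : 0 < j → t.head? ≠ some x := by
      intro hj0 hc
      have h0 : t[0]'(by omega) = x := by
        cases t with
        | nil => simp at hc
        | cons a b => simpa using Option.some_inj.mp hc
      exact hjfirst 0 hj0 h0
    have hb := bubble_run t x j hjlen hx0 j P s ((P.length : Int) + 1 + j).natAbs le_rfl hfuel
    rw [hdecomp]
    rw [show ((P.length : Int) + 1 + (j : Int)) = (P.length : Int) + 1 + (j : Nat) from rfl] at *
    rw [hb]
    -- phase 3: the pair is matched, the rest of the scan does nothing
    apply foldl_fixed
    intro j' hj'
    rw [PySem.List.mem_pyRange_one] at hj'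
    apply step_fixed _ _ _ (by omega)
    have e1 : PySem.List.pyGet? (P ++ x :: x :: (t.take j ++ t.drop (j+1))) (P.length : Int) = some x := hgetA _
    have e2 : PySem.List.pyGet? (P ++ x :: x :: (t.take j ++ t.drop (j+1))) ((P.length : Int) + 1) = some x := by
      have := pyGet_at (P ++ [x]) x (t.take j ++ t.drop (j+1)) ((P.length : Int) + 1) (by push_cast; simp)
      simpa using this
    rw [e1, e2]
lemma pyRange2_nil (a b : Int) (h : b ≤ a) : PySem.List.pyRange a b 2 = [] := by
  rw [PySem.List.pyRange_of_pos _ _ (by norm_num)]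
  rw [if_neg (by omega)]
  simp
lemma pyRange2_cons (a b : Int) (h : a < b) : PySem.List.pyRange a b 2 = a :: PySem.List.pyRange (a+2) b 2 := by
  rw [PySem.List.pyRange_of_pos _ _ (by norm_num), PySem.List.pyRange_of_pos _ _ (by norm_num)]
  have hn : ((b - a + 2 - 1)/2).toNat = (if a + 2 < b then ((b - (a+2) + 2 - 1)/2).toNat else 0) + 1 := by
    split <;> omega
  rw [if_pos h, hn, List.range_succ_eq_map]
  simp only [List.map_cons, List.map_map]
  congr 1
  · simp
  · apply List.map_congr_left
    intro k _
    simp [Function.comp]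
    push_cast
    ring
lemma outer_run (M P : List Int) (s : Int) :
    ((PySem.List.pyRange (P.length : Int) ((P.length + M.length : Nat) : Int) 2).foldl
      (fun st i => pvInner ((P.length + M.length : Nat) : Int) i st) (P ++ M, s)).2 = pvGo M s := by
  match M with
  | [] =>
    rw [pyRange2_nil _ _ (by simp)]
    simp [pvGo]
  | [x] =>
    rw [pyRange2_cons _ _ (by push_cast [List.length_cons, List.length_nil]; omega),
        pyRange2_nil _ _ (by push_cast [List.length_cons, List.length_nil]; omega)]
    simp only [List.foldl_cons, List.foldl_nil]
    unfold pvInner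
    rw [PySem.List.pyRange_one_eq_nil (by push_cast [List.length_cons, List.length_nil]; omega)]
    simp [pvGo]
  | x :: y :: rest =>
    rw [pyRange2_cons _ _ (by push_cast [List.length_cons, List.length_nil]; omega)]
    simp only [List.foldl_cons]
    have hL : ((P.length + (x :: y :: rest).length : Nat) : Int) = (P.length : Int) + 1 + ((y :: rest).length : Int) := by
      push_cast; simp; ring
    rw [hL, inner_run P x (y :: rest) s]
    cases hidx : PySem.List.index? (y :: rest) x with
    | some j =>
      obtain ⟨hjlen, hjx, hjfirst⟩ := PySem.List.getElem_of_index?_eq_some hidx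
      simp only [hidx]
      have hM' : (y :: rest).take j ++ (y :: rest).drop (j+1) = (y :: rest).eraseIdx j := by
        rw [List.eraseIdx_eq_take_drop_succ]
      have hstate : P ++ x :: x :: ((y :: rest).take j ++ (y :: rest).drop (j+1))
          = (P ++ [x, x]) ++ (y :: rest).eraseIdx j := by rw [hM']; simp
      have hstart : (P.length : Int) + 2 = (((P ++ [x, x]).length : Nat) : Int) := by simp
      have hbound : (P.length : Int) + 1 + ((y :: rest).length : Int)
          = (((P ++ [x, x]).length + ((y :: rest).eraseIdx j).length : Nat) : Int) := by
        have h1 : (P ++ [x, x]).length = P.length + 2 := by simp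
        have h2 : ((y :: rest).eraseIdx j).length = rest.length := by
          have hj' : j < rest.length + 1 := by simpa using hjlen
          simp only [List.length_eraseIdx, List.length_cons]
          split <;> omega
        rw [h1, h2]; push_cast [List.length_cons]; omega
      rw [hstate, hstart, hbound, outer_run ((y :: rest).eraseIdx j) (P ++ [x, x]) (s + j)]
      rw [pvGo, hidx]
    | none =>
      simp only [hidx]
      have hstate : P ++ x :: y :: rest = (P ++ [x, y]) ++ rest := by simp
      have hstart : (P.length : Int) + 2 = (((P ++ [x, y]).length : Nat) : Int) := by simp
      have hbound : (P.length : Int) + 1 + ((y :: rest).length : Int)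
          = (((P ++ [x, y]).length + rest.length : Nat) : Int) := by push_cast; simp; ring
      rw [hstate, hstart, hbound, outer_run rest (P ++ [x, y]) s]
      rw [pvGo, hidx]
termination_by M.length
decreasing_by
  all_goals first
    | (have hj' : j < rest.length + 1 := by simpa using hjlen
       simp [List.length_eraseIdx]
       split <;> omega)
    | simp

-- ===== VERDICT (by name: the statement is the Claim_ definition above) =====
theorem suit_and_tie_spec : Claim_equal_suit_and_tie := by
  intro n T _
  unfold Spec_suit_and_tie suit_and_tie suit_and_tie_alt
  simpa using outer_run T [] 0
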